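-- pv_equiv track=rewrite | github.com/NM0423/SIO1 | Algorithmique/2022.mm.dd (Fin de l'année = 22.05.23) (exo 48 à 55)/Exercices 48 à 55.py | dechiffre
-- ===== SOURCE A (Python) =====
-- def dechiffre(chaine):
--     chaine_dechiffree = ""
--     for i in range(len(chaine)):
--         car = chaine[i]
--         if ord(car) >= 97 and ord(car) <= 122:
--             n = ord(car) - ord('a')
--             r = (n*3)%26
--             car = chr(r+ord('a'))
--         chaine_dechiffree += car
--     return chaine_dechiffree
-- ===== SOURCE B (Python) =====
-- # Divide-and-conquer: split the string in halves recursively; a single letter is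
-- # decoded by indexing a literal image alphabet (no modular arithmetic at runtime).
-- _MAP = "adgjmpsvybehknqtwzcfilorux"
--
-- def dechiffre(chaine):
--     if len(chaine) <= 1:
--         if chaine and 'a' <= chaine <= 'z':
--             return _MAP[ord(chaine) - 97]
--         return chaine
--     m = len(chaine) // 2
--     return dechiffre(chaine[:m]) + dechiffre(chaine[m:])
-- ===== Notes on version B (the rewrite author's own statement) =====
-- stated objective: alternative
-- what changed: A's left-to-right index loop with inline n*3%26 arithmetic and string concatenation is replaced by a divide-and-conquer recursion that splits the string in halves down to single characters, which are decoded by indexing a precomputed literal image alphabet; correctness rests on the per-character map distributing over concatenation.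
import Mathlib
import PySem

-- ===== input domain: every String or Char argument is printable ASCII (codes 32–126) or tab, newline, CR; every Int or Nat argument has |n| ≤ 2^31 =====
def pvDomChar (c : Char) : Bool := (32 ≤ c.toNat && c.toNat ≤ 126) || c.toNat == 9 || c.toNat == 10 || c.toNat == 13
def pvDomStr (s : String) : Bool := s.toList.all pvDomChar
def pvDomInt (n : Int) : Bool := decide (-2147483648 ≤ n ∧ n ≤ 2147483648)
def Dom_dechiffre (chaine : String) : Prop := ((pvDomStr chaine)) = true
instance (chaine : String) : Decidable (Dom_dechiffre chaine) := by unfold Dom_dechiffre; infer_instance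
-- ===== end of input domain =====

-- B replaces A's per-character arithmetic loop by a divide-and-conquer recursion on
-- string halves, decoding single letters by indexing a literal image alphabet
-- (objective: alternative — different structure, similar cost).

-- ===== PORT A =====
-- loop body of A: the per-index transformation of one character (exact; chr is exact
-- here since 0 ≤ r < 26 so r + 97 is a valid scalar value)
def dechiffreStep (car : Char) : Char :=
  if (car.toNat : Int) ≥ 97 ∧ (car.toNat : Int) ≤ 122 then
    let n : Int := (car.toNat : Int) - 97
    let r : Int := PySem.Int.mod (n * 3) 26
    Char.ofNat (r + 97).toNat
  else car

-- A: for i in range(len(chaine)): … chaine_dechiffree += car   (the string accumulator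
-- is kept as its list of chars; chaine[i] is always in range, default unused)
def dechiffre (chaine : String) : String :=
  String.mk
    ((PySem.List.pyRange 0 (chaine.toList.length : Int) 1).foldl
      (fun acc i => acc ++ [dechiffreStep (PySem.List.pyGetD chaine.toList i 'a')]) [])

-- ===== PORT B =====
-- _MAP = "adgjmpsvybehknqtwzcfilorux"
def pvMap : List Char := "adgjmpsvybehknqtwzcfilorux".toList

-- the divide-and-conquer recursion of Source B, on the string's char list.
-- 'a' <= chaine <= 'z' on a length-1 string is exactly the char-code comparison;
-- _MAP[ord(chaine)-97] is in range (index 0..25 for a letter), so the default of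
-- pyGetD is never used; chaine[:m]/chaine[m:] with 0 ≤ m ≤ len are take/drop exactly.
def dechiffreAltGo (l : List Char) : List Char :=
  if h : l.length ≤ 1 then
    match l with
    | [c] =>
      if 97 ≤ c.toNat ∧ c.toNat ≤ 122
      then [PySem.List.pyGetD pvMap ((c.toNat : Int) - 97) c]
      else [c]
    | _ => l
  else
    dechiffreAltGo (l.take (l.length / 2)) ++ dechiffreAltGo (l.drop (l.length / 2))
termination_by l.length
decreasing_by
  · simp only [List.length_take]; omega
  · simp only [List.length_drop]; omega

def dechiffre_alt (chaine : String) : String :=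
  String.mk (dechiffreAltGo chaine.toList)

-- ===== PRECONDITION & SPEC =====
def Spec_dechiffre (chaine : String) (out : String) : Prop := out = dechiffre_alt chaine
instance (chaine : String) (out : String) : Decidable (Spec_dechiffre chaine out) := by unfold Spec_dechiffre; infer_instance

-- ===== CLAIM (what is proved, stated in full; the proofs are below) =====
def Claim_equal_dechiffre : Prop := ∀ (chaine : String), Dom_dechiffre chaine → Spec_dechiffre chaine (dechiffre chaine)

-- ===== LEMMAS AND PROOFS =====

-- the single-letter base case of B computes A's per-character step
theorem map_lookup_eq_step (c : Char) (h1 : 97 ≤ c.toNat) (h2 : c.toNat ≤ 122) :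
    PySem.List.pyGetD pvMap ((c.toNat : Int) - 97) c = dechiffreStep c := by
  rw [← Char.ofNat_toNat c]
  generalize c.toNat = n at h1 h2
  interval_cases n <;> decide

-- B's recursion computes the per-character map (strong induction on the halves)
theorem altGo_eq_map (l : List Char) : dechiffreAltGo l = l.map dechiffreStep := by
  induction l using dechiffreAltGo.induct with
  | case1 c h1 hlet h2 =>
    rw [dechiffreAltGo]
    simp only [List.length_cons, List.length_nil, le_refl, dite_true, List.map]
    rw [if_pos hlet, map_lookup_eq_step c hlet.1 hlet.2]
  | case2 c h1 hnot h2 =>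
    rw [dechiffreAltGo]
    simp only [List.length_cons, List.length_nil, le_refl, dite_true, List.map]
    rw [if_neg hnot]
    unfold dechiffreStep
    rw [if_neg]
    intro ⟨ha, hb⟩
    exact hnot ⟨by exact_mod_cast ha, by exact_mod_cast hb⟩
  | case3 l h1 h2 hne =>
    have hl : l = [] := by
      match l, h2, hne with
      | [], _, _ => rfl
      | [c], h2, hne => exact absurd rfl (fun he => hne c h2 he (HEq.refl _))
    subst hl
    rw [dechiffreAltGo]; rfl
  | case4 l h ih1 ih2 =>
    rw [dechiffreAltGo]
    rw [dif_neg h, ih1, ih2, ← List.map_append, List.take_append_drop]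

-- A's indexed loop computes the same per-character map
theorem dechiffre_eq_map (chaine : String) :
    dechiffre chaine = String.mk (chaine.toList.map dechiffreStep) := by
  unfold dechiffre
  rw [PySem.List.foldl_pyRange_zero_pyGetD' chaine.toList 'a'
        (fun acc c => acc ++ [dechiffreStep c]) []]
  rw [PySem.List.foldl_append_singleton_eq_map]
  simp

-- ===== VERDICT (by name: the statement is the Claim_ definition above) =====
theorem dechiffre_spec : Claim_equal_dechiffre := by
  intro chaine _
  unfold Spec_dechiffre dechiffre_alt
  rw [dechiffre_eq_map, altGo_eq_map]
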